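-- pv_equiv track=rewrite | github.com/Thomas11411/Python-LeetCode | 2020-remove-one-element-to-make-the-array-strictly-increasing/2020-remove-one-element-to-make-the-array-strictly-increasing.py | canBeIncreasing
-- ===== SOURCE A (Python) =====
-- from typing import List
--
-- def canBeIncreasing(nums: List[int]) -> bool:
--     for i in range(len(nums)):
--         temp = nums.copy()
--         temp.pop(i)
--         for j in range(1,len(temp)):
--             if temp[j - 1] >= temp[j]:
--                 break
--         else:
--             return True
--     return False
-- ===== SOURCE B (Python) =====
-- def _strict(l):
--     return all(a < b for a, b in zip(l, l[1:]))
--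
-- def canBeIncreasing(nums):
--     # O(n): find the first adjacent violation; only removing one of its two
--     # elements can possibly help.
--     if not nums:
--         return False
--     for i in range(len(nums) - 1):
--         if nums[i] >= nums[i + 1]:
--             return _strict(nums[:i] + nums[i + 1:]) or _strict(nums[:i + 1] + nums[i + 2:])
--     return True
-- ===== Notes on version B (the rewrite author's own statement) =====
-- stated objective: faster
-- what changed: Instead of trying every removal and rescanning the whole array (A), B scans once for the first adjacent violation and only tests removing one of its two elements, since any other removal cannot fix that violation.
import Mathlib
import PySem

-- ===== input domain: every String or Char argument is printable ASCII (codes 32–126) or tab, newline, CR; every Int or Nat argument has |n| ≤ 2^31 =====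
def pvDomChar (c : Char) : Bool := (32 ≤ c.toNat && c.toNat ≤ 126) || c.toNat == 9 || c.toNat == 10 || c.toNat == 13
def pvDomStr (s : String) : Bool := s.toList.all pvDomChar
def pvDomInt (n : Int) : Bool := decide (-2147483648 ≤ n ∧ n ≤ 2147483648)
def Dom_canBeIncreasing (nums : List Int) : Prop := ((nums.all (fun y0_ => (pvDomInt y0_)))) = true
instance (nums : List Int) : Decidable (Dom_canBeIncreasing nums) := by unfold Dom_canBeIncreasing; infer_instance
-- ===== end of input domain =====

-- B replaces A's try-every-removal-and-rescan (O(n^2)) by a single scan to the first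
-- adjacent violation, testing only the removal of one of its two elements (O(n)).


-- ===== PORT A =====
-- outer loop with early `return True` = any; inner `for … break / else` = all
def canBeIncreasing (nums : List Int) : Bool :=
  (PySem.List.pyRange 0 (nums.length : Int) 1).any (fun i =>
    match PySem.List.pop? nums i with
    | some (_, temp) =>
        (PySem.List.pyRange 1 (temp.length : Int) 1).all (fun j =>
          decide (PySem.List.pyGetD temp (j - 1) 0 < PySem.List.pyGetD temp j 0))
    | none => false)   -- unreachable: i is always a valid index

-- ===== PORT B =====
-- _strict(l) = all(a < b for a, b in zip(l, l[1:]))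
def pvStrict (l : List Int) : Bool :=
  (l.zip (PySem.List.slice l (some 1) none)).all (fun p => decide (p.1 < p.2))

-- the `for i in range(len(nums) - 1)` loop of Source B, as structural recursion on i
def pvAltGo (nums : List Int) (i : Nat) : Bool :=
  if _h : i < nums.length - 1 then
    if PySem.List.pyGetD nums (i : Int) 0 ≥ PySem.List.pyGetD nums ((i : Int) + 1) 0 then
      pvStrict (PySem.List.slice nums none (some (i : Int)) ++
                PySem.List.slice nums (some ((i : Int) + 1)) none) ||
      pvStrict (PySem.List.slice nums none (some ((i : Int) + 1)) ++
                PySem.List.slice nums (some ((i : Int) + 2)) none)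
    else pvAltGo nums (i + 1)
  else true
termination_by nums.length - 1 - i

def canBeIncreasing_alt (nums : List Int) : Bool :=
  if nums = [] then false else pvAltGo nums 0

-- ===== PRECONDITION & SPEC =====
def Spec_canBeIncreasing (nums : List Int) (out : Bool) : Prop := out = canBeIncreasing_alt nums
instance (nums : List Int) (out : Bool) : Decidable (Spec_canBeIncreasing nums out) := by unfold Spec_canBeIncreasing; infer_instance

-- ===== CLAIM (what is proved, stated in full; the proofs are below) =====
def Claim_equal_canBeIncreasing : Prop := ∀ (nums : List Int), Dom_canBeIncreasing nums → Spec_canBeIncreasing nums (canBeIncreasing nums)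

-- ===== LEMMAS AND PROOFS =====

-- pvStrict decides strict increase of adjacent pairs
lemma pvStrict_iff (l : List Int) : pvStrict l = true ↔ l.IsChain (· < ·) := by
  induction l with
  | nil => simp [pvStrict]
  | cons a t ih =>
    cases t with
    | nil => simp [pvStrict, PySem.List.slice_from _ (by norm_num : (0:Int) ≤ 1)]
    | cons b t' =>
      rw [pvStrict, PySem.List.slice_from _ (by norm_num : (0:Int) ≤ 1)]
      rw [pvStrict, PySem.List.slice_from _ (by norm_num : (0:Int) ≤ 1)] at ih
      simp only [Int.toNat_one, List.drop_one, List.tail_cons, List.zip_cons_cons,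
        List.all_cons, Bool.and_eq_true, decide_eq_true_eq] at ih ⊢
      rw [List.isChain_cons_cons]
      exact and_congr Iff.rfl ih

-- the target property: some single removal leaves a strictly increasing list
abbrev pvGood (nums : List Int) : Prop :=
  ∃ k, ∃ _ : k < nums.length, (nums.eraseIdx k).IsChain (· < ·)

-- A's inner loop decides IsChain (<)
lemma innerA_iff (temp : List Int) :
    ((PySem.List.pyRange 1 (temp.length : Int) 1).all (fun j =>
      decide (PySem.List.pyGetD temp (j - 1) 0 < PySem.List.pyGetD temp j 0))) = true
    ↔ temp.IsChain (· < ·) := by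
  rw [List.all_eq_true, List.isChain_iff_getElem]
  constructor
  · intro h m hm
    have := h ((m : Int) + 1) (by
      rw [PySem.List.mem_pyRange_one]; constructor <;> omega)
    simp only [decide_eq_true_eq] at this
    have e1 : (m : Int) + 1 - 1 = ((m : Nat) : Int) := by ring
    rw [e1] at this
    have e2 : ((m : Nat) : Int) + 1 = (((m + 1 : Nat)) : Int) := by push_cast; ring
    rw [e2] at this
    rw [PySem.List.pyGetD_natCast, PySem.List.pyGetD_natCast] at this
    rwa [List.getD_eq_getElem _ _ (by omega), List.getD_eq_getElem _ _ hm] at this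
  · intro h j hj
    rw [PySem.List.mem_pyRange_one] at hj
    obtain ⟨h1, h2⟩ := hj
    set m : Nat := (j - 1).toNat with hm
    have hj' : j = ((m : Int)) + 1 := by omega
    have hm1 : m + 1 < temp.length := by omega
    simp only [decide_eq_true_eq, hj']
    have e1 : (m : Int) + 1 - 1 = ((m : Nat) : Int) := by ring
    have e2 : ((m : Nat) : Int) + 1 = (((m + 1 : Nat)) : Int) := by push_cast; ring
    rw [e1, e2, PySem.List.pyGetD_natCast, PySem.List.pyGetD_natCast,
      List.getD_eq_getElem _ _ (by omega), List.getD_eq_getElem _ _ hm1]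
    exact h m hm1

-- A decides pvGood
lemma canBeIncreasing_eq_good (nums : List Int) :
    canBeIncreasing nums = decide (pvGood nums) := by
  rcases h : decide (pvGood nums) with _ | _
  · simp only [decide_eq_false_iff_not, pvGood, not_exists] at h
    rw [canBeIncreasing]
    rw [List.any_eq_false]
    intro x hx
    rw [PySem.List.mem_pyRange_one] at hx
    have hk : x.toNat < nums.length := by omega
    have hx' : x = ((x.toNat : Nat) : Int) := by omega
    rw [hx', PySem.List.pop?_natCast nums x.toNat hk]
    simp only [Bool.not_eq_true]
    rw [Bool.eq_false_iff, Ne, innerA_iff]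
    exact h x.toNat hk
  · simp only [decide_eq_true_eq, pvGood] at h
    obtain ⟨k, hk, hch⟩ := h
    rw [canBeIncreasing, List.any_eq_true]
    refine ⟨(k : Int), ?_, ?_⟩
    · rw [PySem.List.mem_pyRange_one]; constructor <;> omega
    · rw [PySem.List.pop?_natCast nums k hk]
      rw [innerA_iff]
      exact hch

-- a removal preserves strict increase
lemma chain_eraseIdx {l : List Int} (h : l.IsChain (· < ·)) (k : Nat) :
    (l.eraseIdx k).IsChain (· < ·) :=
  h.sublist (List.eraseIdx_sublist l k)

-- removing an element away from a violation cannot fix it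
lemma not_chain_eraseIdx_of_violation {l : List Int} {v k : Nat}
    (hv : v + 1 < l.length) (hviol : l[v+1]'hv ≤ l[v]'(by omega))
    (hk : k < l.length) (hkv : k ≠ v) (hkv1 : k ≠ v + 1) :
    ¬ (l.eraseIdx k).IsChain (· < ·) := by
  intro hch
  rw [List.isChain_iff_getElem] at hch
  have hlen : (l.eraseIdx k).length = l.length - 1 := by
    rw [List.length_eraseIdx]; simp [hk]
  rcases Nat.lt_or_ge k v with hlt | hge
  · -- k < v : positions v-1, v of the erased list are l[v], l[v+1]
    obtain ⟨j, rfl⟩ : ∃ j, v = j + 1 := ⟨v - 1, by omega⟩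
    have h1 : j + 1 < (l.eraseIdx k).length := by omega
    have := hch j h1
    rw [List.getElem_eraseIdx_of_ge _ (by omega),
        List.getElem_eraseIdx_of_ge _ (by omega)] at this
    omega
  · -- k > v + 1 : positions v, v+1 are untouched
    have hgt : v + 1 < k := by omega
    have h1 : v + 1 < (l.eraseIdx k).length := by omega
    have := hch v h1
    rw [List.getElem_eraseIdx_of_lt _ (by omega),
        List.getElem_eraseIdx_of_lt _ (by omega)] at this
    omega

-- the loop invariant: once no violation exists before i, the loop decides pvGood
lemma pvAltGo_eq_good (nums : List Int) (hne : nums ≠ []) (i : Nat)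
    (H : ∀ m : Nat, m < i → (h : m + 1 < nums.length) → nums[m]'(by omega) < nums[m+1]'h) :
    pvAltGo nums i = decide (pvGood nums) := by
  rw [pvAltGo]
  split
  case isTrue hi =>
    have hi1 : i + 1 < nums.length := by omega
    have e1 : ((i : Nat) : Int) + 1 = (((i + 1 : Nat)) : Int) := by push_cast; ring
    rw [e1, PySem.List.pyGetD_natCast, PySem.List.pyGetD_natCast,
      List.getD_eq_getElem _ _ (by omega), List.getD_eq_getElem _ _ hi1]
    split
    case isTrue hviol =>
      -- first violation at i: only removing i or i+1 can possibly work
      have e2 : ((i : Nat) : Int) + 2 = (((i + 2 : Nat)) : Int) := by push_cast; ring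
      rw [e2, PySem.List.slice_to _ (by omega), PySem.List.slice_from _ (by omega),
        PySem.List.slice_to _ (by omega), PySem.List.slice_from _ (by omega)]
      have c1 : (((i : Nat) : Int)).toNat = i := by omega
      have c2 : ((((i + 1 : Nat)) : Int)).toNat = i + 1 := by omega
      have c3 : ((((i + 2 : Nat)) : Int)).toNat = i + 2 := by omega
      rw [c1, c2, c3, ← List.eraseIdx_eq_take_drop_succ nums i,
        ← List.eraseIdx_eq_take_drop_succ nums (i + 1)]
      rcases h : decide (pvGood nums) with _ | _
      · simp only [decide_eq_false_iff_not, pvGood, not_exists] at h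
        rw [Bool.or_eq_false_iff, Bool.eq_false_iff, Bool.eq_false_iff, Ne, Ne,
          pvStrict_iff, pvStrict_iff]
        exact ⟨fun hc => h i (by omega) hc, fun hc => h (i + 1) hi1 hc⟩
      · simp only [decide_eq_true_eq, pvGood] at h
        obtain ⟨k, hk, hch⟩ := h
        rw [Bool.or_eq_true, pvStrict_iff, pvStrict_iff]
        by_cases hki : k = i
        · left; rw [← hki]; exact hch
        by_cases hki1 : k = i + 1
        · right; rw [← hki1]; exact hch
        · exact absurd hch
            (not_chain_eraseIdx_of_violation hi1 hviol hk hki hki1)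
    case isFalse hok =>
      refine pvAltGo_eq_good nums hne (i + 1) ?_
      intro m hm h
      rcases Nat.lt_or_ge m i with hlt | hge
      · exact H m hlt h
      · have : m = i := by omega
        subst this; omega
  case isFalse hi =>
    -- no violation at all: nums is strictly increasing, removing the last works
    have hch : nums.IsChain (· < ·) := by
      rw [List.isChain_iff_getElem]
      intro m hm
      exact H m (by omega) hm
    have hpos : 0 < nums.length := List.length_pos_of_ne_nil hne
    have : pvGood nums := ⟨nums.length - 1, by omega, chain_eraseIdx hch _⟩
    simp [this]
termination_by nums.length - 1 - i

-- ===== VERDICT (by name: the statement is the Claim_ definition above) =====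
theorem canBeIncreasing_spec : Claim_equal_canBeIncreasing := by
  intro nums _
  unfold Spec_canBeIncreasing canBeIncreasing_alt
  rcases h : nums with _ | ⟨a, t⟩
  · simp [canBeIncreasing]
  · rw [if_neg (by simp)]
    rw [pvAltGo_eq_good _ (by simp) 0 (by omega)]
    exact canBeIncreasing_eq_good _
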